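-- pv_equiv track=rewrite | github.com/JPPPPPPPPP/IRC-2021 | Codigo Individual - Joao Pargana/server-responsavel.py | MODIFYACTIVITY_Aux
-- ===== SOURCE A (Python) =====
-- def MODIFYACTIVITY_Aux(message, acti):
-- 	msg = message.upper()
-- 	msg = msg[:-1:]
-- 	msg = msg.split(" ")
-- 	a = acti.split("|")
-- 	response = ''
-- 	x = 0
-- 	#checks if the parameter is an int
-- 	try:
-- 		thing = int(msg[3])
-- 	except ValueError:
-- 		return 'bad param'
-- 	#changes activity
-- 	if(msg[2] == 'LOTACAO'):
-- 		#sums up all elements into a string and only changing the lotacao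
-- 		for temp in a:
-- 			if(x == 4):
-- 				response += msg[3] + "|"
-- 			else:
-- 				response += temp + "|"
-- 			x += 1
-- 		return response[:-1:]
-- 	elif(msg[2] == 'PONTUACAO'):
-- 		#sums up all elements into a string and only changing the pontuacao
-- 		for temp in a:
-- 			if(x == 6):
-- 				response += msg[3] + "|"
-- 			else:
-- 				response += temp + "|"
-- 			x += 1
-- 		return response[:-1:]
-- 	elif(msg[2] == 'CUSTO'):
-- 		#sums up all elements into a string and only changing the custo
-- 		for temp in a:
-- 			if(x == 7):
-- 				response += msg[3] + "|"
-- 			else: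
-- 				response += temp + "|"
-- 			x += 1
-- 		return response[:-1:]
--
-- 	#if the value to change isnt one of the three then there are bad parameters
-- 	return 'bad param'
-- ===== SOURCE B (Python) =====
-- def MODIFYACTIVITY_Aux(message, acti):
--     msg = message.upper()[:-1].split(" ")
--     try:
--         int(msg[3])
--     except ValueError:
--         return 'bad param'
--     targets = {'LOTACAO': 4, 'PONTUACAO': 6, 'CUSTO': 7}
--     if msg[2] not in targets:
--         return 'bad param'
--     a = acti.split("|")
--     idx = targets[msg[2]]
--     if idx < len(a):
--         a[idx] = msg[3]
--     return "|".join(a)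
-- ===== Notes on version B (the rewrite author's own statement) =====
-- stated objective: simpler
-- what changed: A's three near-identical counter-and-concatenate rebuild loops (one per keyword) are replaced by a single keyword-to-index table lookup, a guarded in-place update of the split list, and one '|'-join.
import Mathlib
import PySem

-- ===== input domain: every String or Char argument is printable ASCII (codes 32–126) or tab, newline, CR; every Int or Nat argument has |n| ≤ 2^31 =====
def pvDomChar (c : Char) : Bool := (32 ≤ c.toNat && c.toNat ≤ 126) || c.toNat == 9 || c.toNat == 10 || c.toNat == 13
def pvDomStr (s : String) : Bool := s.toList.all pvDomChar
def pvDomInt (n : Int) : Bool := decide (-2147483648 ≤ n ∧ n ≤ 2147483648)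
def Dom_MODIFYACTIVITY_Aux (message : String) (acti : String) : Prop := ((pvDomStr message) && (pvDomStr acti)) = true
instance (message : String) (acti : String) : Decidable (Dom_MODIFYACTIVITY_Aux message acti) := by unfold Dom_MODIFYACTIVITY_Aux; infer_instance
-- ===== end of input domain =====

-- B replaces A's three near-identical counter-and-concatenate rebuild loops by one table lookup
-- (field name → index) plus a guarded single-element list update and one join (objective: simpler).

-- ===== PORT A =====
def MODIFYACTIVITY_Aux (message : String) (acti : String) : String :=
  let msg := PySem.Chars.splitOn (PySem.Chars.slice (PySem.Chars.upper message.toList) none (some (-1))) " ".toList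
  let a := PySem.Chars.splitOn acti.toList "|".toList
  match PySem.List.pyGet? msg 3 with
  | none => ""  -- IndexError (msg has fewer than 4 fields): outside Pre_
  | some m3 =>
    match PySem.Int.ofChars? m3 with
    | none => "bad param"
    | some _ =>
      if PySem.List.pyGetD msg 2 [] = "LOTACAO".toList then
        String.ofList (PySem.Chars.slice
          ((a.foldl (fun (p : List Char × Int) temp =>
              if p.2 = 4 then (p.1 ++ m3 ++ ['|'], p.2 + 1) else (p.1 ++ temp ++ ['|'], p.2 + 1))
            ([], 0)).1) none (some (-1)))
      else if PySem.List.pyGetD msg 2 [] = "PONTUACAO".toList then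
        String.ofList (PySem.Chars.slice
          ((a.foldl (fun (p : List Char × Int) temp =>
              if p.2 = 6 then (p.1 ++ m3 ++ ['|'], p.2 + 1) else (p.1 ++ temp ++ ['|'], p.2 + 1))
            ([], 0)).1) none (some (-1)))
      else if PySem.List.pyGetD msg 2 [] = "CUSTO".toList then
        String.ofList (PySem.Chars.slice
          ((a.foldl (fun (p : List Char × Int) temp =>
              if p.2 = 7 then (p.1 ++ m3 ++ ['|'], p.2 + 1) else (p.1 ++ temp ++ ['|'], p.2 + 1))
            ([], 0)).1) none (some (-1)))
      else "bad param"

-- ===== PORT B =====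
def MODIFYACTIVITY_Aux_alt (message : String) (acti : String) : String :=
  let msg := PySem.Chars.splitOn (PySem.Chars.slice (PySem.Chars.upper message.toList) none (some (-1))) " ".toList
  match PySem.List.pyGet? msg 3 with
  | none => ""  -- IndexError: outside Pre_
  | some m3 =>
    match PySem.Int.ofChars? m3 with
    | none => "bad param"
    | some _ =>
      let targets : PySem.Dict (List Char) Int :=
        PySem.Dict.mk [("LOTACAO".toList, 4), ("PONTUACAO".toList, 6), ("CUSTO".toList, 7)]
      match targets.get? (PySem.List.pyGetD msg 2 []) with
      | none => "bad param"
      | some idx =>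
        let a := PySem.Chars.splitOn acti.toList "|".toList
        let a' := if idx < (a.length : Int) then a.set idx.toNat m3 else a
        String.ofList (PySem.Chars.join ['|'] a')

-- ===== PRECONDITION & SPEC =====
-- Pre_ excludes exactly the inputs where A raises IndexError: the space-split of the
-- uppercased, last-character-dropped message has fewer than 4 fields, so msg[3] fails.
def Pre_MODIFYACTIVITY_Aux (message : String) (acti : String) : Prop :=
  4 ≤ (PySem.Chars.splitOn (PySem.Chars.slice (PySem.Chars.upper message.toList) none (some (-1))) " ".toList).length
instance (message : String) (acti : String) : Decidable (Pre_MODIFYACTIVITY_Aux message acti) := by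
  unfold Pre_MODIFYACTIVITY_Aux; infer_instance
def pvWitness_MODIFYACTIVITY_Aux : String × String := ("a b lotacao 5 ", "x|y|z|u|v|w")

def Spec_MODIFYACTIVITY_Aux (message : String) (acti : String) (out : String) : Prop := out = MODIFYACTIVITY_Aux_alt message acti
instance (message : String) (acti : String) (out : String) : Decidable (Spec_MODIFYACTIVITY_Aux message acti out) := by unfold Spec_MODIFYACTIVITY_Aux; infer_instance

-- ===== CLAIM (what is proved, stated in full; the proofs are below) =====
def Claim_equal_MODIFYACTIVITY_Aux : Prop := ∀ (message : String) (acti : String), Dom_MODIFYACTIVITY_Aux message acti → Pre_MODIFYACTIVITY_Aux message acti → Spec_MODIFYACTIVITY_Aux message acti (MODIFYACTIVITY_Aux message acti)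

-- ===== LEMMAS AND PROOFS =====

-- the body of one of A's rebuild loops, as a structural recursion on the remaining fields,
-- with x the running counter and k the field index being replaced
def pvRun (m3 : List Char) (k : Int) : List (List Char) → Int → List Char
  | [], _ => []
  | t :: ts, x => (if x = k then m3 else t) ++ ['|'] ++ pvRun m3 k ts (x + 1)

theorem pvFoldl_eq_run (m3 : List Char) (k : Int) :
    ∀ (a : List (List Char)) (r : List Char) (x : Int),
      (a.foldl (fun (p : List Char × Int) temp =>
          if p.2 = k then (p.1 ++ m3 ++ ['|'], p.2 + 1) else (p.1 ++ temp ++ ['|'], p.2 + 1))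
        (r, x)).1 = r ++ pvRun m3 k a x := by
  intro a
  induction a with
  | nil => intro r x; simp [pvRun]
  | cons t ts ih =>
    intro r x
    by_cases h : x = k
    · rw [List.foldl_cons,
        show (if (r, x).2 = k then ((r, x).1 ++ m3 ++ ['|'], (r, x).2 + 1)
              else ((r, x).1 ++ t ++ ['|'], (r, x).2 + 1)) = (r ++ m3 ++ ['|'], x + 1) from by simp [h],
        ih, pvRun]
      simp [h, List.append_assoc]
    · rw [List.foldl_cons,
        show (if (r, x).2 = k then ((r, x).1 ++ m3 ++ ['|'], (r, x).2 + 1)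
              else ((r, x).1 ++ t ++ ['|'], (r, x).2 + 1)) = (r ++ t ++ ['|'], x + 1) from by simp [h],
        ih, pvRun]
      simp [h, List.append_assoc]

theorem pvRun_eq_flatten (m3 : List Char) (k : Int) :
    ∀ (a : List (List Char)) (x : Int),
      pvRun m3 k a x =
        ((if x ≤ k ∧ k < x + (a.length : Int) then a.set (k - x).toNat m3 else a).map
          (· ++ ['|'])).flatten := by
  intro a
  induction a with
  | nil => intro x; split <;> simp [pvRun]
  | cons t ts ih =>
    intro x
    by_cases h : x = k
    · subst h
      simp only [pvRun, ih]
      have hts : ¬ (x + 1 ≤ x ∧ x < (x + 1) + (ts.length : Int)) := by omega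
      have hc : x ≤ x ∧ x < x + ((t :: ts).length : Int) :=
        ⟨le_refl x, by push_cast [List.length_cons]; omega⟩
      rw [if_neg hts, if_pos hc]
      simp
    · simp only [pvRun, if_neg h, ih]
      by_cases hc : x ≤ k ∧ k < x + ((t :: ts).length : Int)
      · have hc' : x + 1 ≤ k ∧ k < (x + 1) + (ts.length : Int) := by
          push_cast [List.length_cons] at hc ⊢; omega
        rw [if_pos hc, if_pos hc']
        have hkx : (k - x).toNat = (k - (x + 1)).toNat + 1 := by omega
        rw [hkx]
        simp [List.append_assoc]
      · have hc' : ¬ (x + 1 ≤ k ∧ k < (x + 1) + (ts.length : Int)) := by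
          push_cast [List.length_cons] at hc ⊢; omega
        rw [if_neg hc, if_neg hc']
        simp [List.append_assoc]

theorem pvDropLast_flatten (c : Char) :
    ∀ (l : List (List Char)), ((l.map (· ++ [c])).flatten).dropLast = List.intercalate [c] l := by
  intro l
  induction l with
  | nil => simp [List.intercalate]
  | cons t ts ih =>
    cases ts with
    | nil => simp [List.intercalate]
    | cons u us =>
      simp only [List.map_cons, List.flatten_cons] at ih ⊢
      rw [List.dropLast_append_of_ne_nil (by simp), ih,
        show List.intercalate [c] (t :: u :: us) = t ++ [c] ++ List.intercalate [c] (u :: us) from by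
          simp [List.intercalate, List.intersperse]]

theorem pvJoin_eq (s : List Char) (l : List (List Char)) :
    PySem.Chars.join s l = List.intercalate s l := rfl

-- one branch of the equivalence: A's rebuild loop with threshold k equals B's guarded set + join
theorem pvBranch (m3 : List Char) (a : List (List Char)) (k : Int) (hk : 0 ≤ k) :
    PySem.Chars.slice
      ((a.foldl (fun (p : List Char × Int) temp =>
          if p.2 = k then (p.1 ++ m3 ++ ['|'], p.2 + 1) else (p.1 ++ temp ++ ['|'], p.2 + 1))
        ([], 0)).1) none (some (-1)) =
    PySem.Chars.join ['|'] (if k < (a.length : Int) then a.set k.toNat m3 else a) := by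
  rw [pvFoldl_eq_run, List.nil_append, pvRun_eq_flatten]
  simp only [PySem.Chars.slice_eq_listSlice, PySem.List.slice_to_neg_one]
  rw [pvDropLast_flatten, pvJoin_eq]
  congr 1
  by_cases h : k < (a.length : Int)
  · rw [if_pos ⟨hk, by omega⟩, if_pos h]
    norm_num
  · rw [if_neg (by omega), if_neg h]

-- ===== VERDICT (by name: the statement is the Claim_ definition above) =====
theorem MODIFYACTIVITY_Aux_spec : Claim_equal_MODIFYACTIVITY_Aux := by
  intro message acti _ _
  unfold Spec_MODIFYACTIVITY_Aux MODIFYACTIVITY_Aux MODIFYACTIVITY_Aux_alt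
  cases hg : PySem.List.pyGet? (PySem.Chars.splitOn (PySem.Chars.slice (PySem.Chars.upper message.toList) none (some (-1))) " ".toList) 3 with
  | none => simp only [hg]
  | some m3 =>
    cases hi : PySem.Int.ofChars? m3 with
    | none => simp only [hg, hi]
    | some n =>
      simp only [hg, hi]
      generalize PySem.List.pyGetD (PySem.Chars.splitOn (PySem.Chars.slice (PySem.Chars.upper message.toList) none (some (-1))) " ".toList) 2 [] = m2
      generalize PySem.Chars.splitOn acti.toList "|".toList = a
      by_cases h1 : m2 = "LOTACAO".toList
      · have b1 : ("LOTACAO".toList == m2) = true := by simp [h1]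
        rw [if_pos h1]
        simp only [PySem.Dict.get?_mk_cons, b1, if_true]
        rw [pvBranch m3 a 4 (by norm_num)]
      · have b1 : ("LOTACAO".toList == m2) = false := by
          rw [beq_eq_false_iff_ne]; exact fun h => h1 h.symm
        rw [if_neg h1]
        by_cases h2 : m2 = "PONTUACAO".toList
        · have b2 : ("PONTUACAO".toList == m2) = true := by simp [h2]
          rw [if_pos h2]
          simp only [PySem.Dict.get?_mk_cons, b1, b2, if_true, Bool.false_eq_true, if_false]
          rw [pvBranch m3 a 6 (by norm_num)]
        · have b2 : ("PONTUACAO".toList == m2) = false := by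
            rw [beq_eq_false_iff_ne]; exact fun h => h2 h.symm
          rw [if_neg h2]
          by_cases h3 : m2 = "CUSTO".toList
          · have b3 : ("CUSTO".toList == m2) = true := by simp [h3]
            rw [if_pos h3]
            simp only [PySem.Dict.get?_mk_cons, b1, b2, b3, if_true, Bool.false_eq_true, if_false]
            rw [pvBranch m3 a 7 (by norm_num)]
          · have b3 : ("CUSTO".toList == m2) = false := by
              rw [beq_eq_false_iff_ne]; exact fun h => h3 h.symm
            rw [if_neg h3]
            simp only [PySem.Dict.get?_mk_cons, b1, b2, b3, Bool.false_eq_true, if_false]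
            rfl
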